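-- pv_equiv track=rewrite | github.com/cessda/cessda.cdc.skg-if.api | cessda_skgif_api/transformers/skgif_transformer.py | select_preferred_language_entries
-- ===== SOURCE A (Python) =====
-- from typing import Dict, Any, List, Tuple, Optional, Union
--
-- def select_preferred_language_entries(
--     entries: List[Dict[str, Any]], preferred_lang: str = "en"
-- ) -> List[Dict[str, Any]]:
--     """
--     Select entries in preferred language if available, otherwise fallback to first available language group.
--     """
--     if not entries:
--         return []
--
--     grouped_by_lang = {}
--     for entry in entries:
--         lang = entry.get("language", "unknown")
--         grouped_by_lang.setdefault(lang, []).append(entry)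
--
--     if preferred_lang in grouped_by_lang:
--         return grouped_by_lang[preferred_lang]
--
--     # Fallback to first available language group
--     first_lang = next(iter(grouped_by_lang))
--     return grouped_by_lang[first_lang]
-- ===== SOURCE B (Python) =====
-- def select_preferred_language_entries(entries, preferred_lang="en"):
--     # Simpler: pick the target language first, then filter once; no per-language dict.
--     if not entries:
--         return []
--     langs = [e.get("language", "unknown") for e in entries]
--     target = preferred_lang if preferred_lang in langs else langs[0]
--     return [e for e in entries if e.get("language", "unknown") == target]
-- ===== Notes on version B (the rewrite author's own statement) =====
-- stated objective: simpler
-- what changed: B drops the per-language dict grouping entirely: it decides the target language (preferred if present, else the first entry's language) in one pass over the languages and then returns a single filter of the input list.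
import Mathlib
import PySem

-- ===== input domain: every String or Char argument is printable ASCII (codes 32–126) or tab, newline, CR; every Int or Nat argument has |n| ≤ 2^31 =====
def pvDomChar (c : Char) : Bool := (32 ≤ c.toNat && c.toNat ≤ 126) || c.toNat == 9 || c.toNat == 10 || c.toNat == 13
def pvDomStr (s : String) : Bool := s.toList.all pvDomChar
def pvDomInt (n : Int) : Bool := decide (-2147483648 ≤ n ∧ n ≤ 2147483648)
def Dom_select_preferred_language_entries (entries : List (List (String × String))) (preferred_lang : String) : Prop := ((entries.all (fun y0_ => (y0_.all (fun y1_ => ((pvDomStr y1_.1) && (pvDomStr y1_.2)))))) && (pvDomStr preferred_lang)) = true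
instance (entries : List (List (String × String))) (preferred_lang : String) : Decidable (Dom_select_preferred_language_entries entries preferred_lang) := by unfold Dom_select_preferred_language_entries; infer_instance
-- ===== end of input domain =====

-- B replaces A's per-language dict grouping by "pick the target language, then one filter"; objective: simpler. Return-value equivalence (neither version mutates its input).

-- entry.get("language", "unknown") on the association-list representation of a dict: first match, else the default
def pvLang (e : List (String × String)) : String :=
  match e.find? (fun p => p.1 == "language") with
  | some p => p.2
  | none => "unknown"

-- ===== PORT A =====
def select_preferred_language_entries (entries : List (List (String × String))) (preferred_lang : String) : List (List (String × String)) :=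
  match entries with
  | [] => []
  | _ :: _ =>
    let grouped := entries.foldl (fun d e => d.modify (pvLang e) [] (fun v => v ++ [e])) PySem.Dict.empty
    if grouped.contains preferred_lang then grouped.getD preferred_lang []
    else
      match grouped.keys with
      | [] => []  -- unreachable: entries is nonempty, so grouped has at least one key
      | first_lang :: _ => grouped.getD first_lang []

-- ===== PORT B =====
def select_preferred_language_entries_alt (entries : List (List (String × String))) (preferred_lang : String) : List (List (String × String)) :=
  match entries with
  | [] => []
  | e0 :: rest =>
    let langs := (e0 :: rest).map pvLang
    let target := if preferred_lang ∈ langs then preferred_lang else pvLang e0  -- pvLang e0 = langs[0]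
    (e0 :: rest).filter (fun e => pvLang e == target)

-- ===== PRECONDITION & SPEC =====
def Spec_select_preferred_language_entries (entries : List (List (String × String))) (preferred_lang : String) (out : List (List (String × String))) : Prop := out = select_preferred_language_entries_alt entries preferred_lang
instance (entries : List (List (String × String))) (preferred_lang : String) (out : List (List (String × String))) : Decidable (Spec_select_preferred_language_entries entries preferred_lang out) := by unfold Spec_select_preferred_language_entries; infer_instance

-- ===== CLAIM (what is proved, stated in full; the proofs are below) =====
def Claim_equal_select_preferred_language_entries : Prop := ∀ (entries : List (List (String × String))) (preferred_lang : String), Dom_select_preferred_language_entries entries preferred_lang → Spec_select_preferred_language_entries entries preferred_lang (select_preferred_language_entries entries preferred_lang)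

-- ===== LEMMAS AND PROOFS =====

-- A's group lookup is a filter of the input (library grouping lemma, transported through List.foldl_map)
lemma pv_getD_group (l : List (List (String × String))) (c : String) :
    (l.foldl (fun d e => d.modify (pvLang e) [] (fun v => v ++ [e])) PySem.Dict.empty).getD c []
      = l.filter (fun e => pvLang e == c) := by
  have h := PySem.Dict.getD_foldl_modify_append (l.map (fun e => (pvLang e, e))) PySem.Dict.empty c
  rw [List.foldl_map] at h
  simpa [List.filter_map, List.map_map, Function.comp_def] using h

-- A's key list is the ordered dedup of the language list
lemma pv_keys_group (l : List (List (String × String))) :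
    (l.foldl (fun d e => d.modify (pvLang e) [] (fun v => v ++ [e])) PySem.Dict.empty).keys
      = PySem.Set.ofList (l.map pvLang) := by
  have h := PySem.Dict.keys_foldl_modify_key l pvLang ([] : List (List (String × String)))
      (fun _ e => fun v => v ++ [e]) PySem.Dict.empty
  simpa [PySem.Dict.keys_empty, PySem.Set.update_nil_left] using h

lemma pv_set_add_cases (acc : PySem.Set String) (x : String) : acc.add x = acc ∨ acc.add x = acc ++ [x] := by
  simp [PySem.Set.add]; tauto

lemma pv_foldl_add_prefix (l : List String) (acc : PySem.Set String) :
    ∃ t, l.foldl PySem.Set.add acc = acc ++ t := by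
  induction l generalizing acc with
  | nil => exact ⟨[], by simp⟩
  | cons x xs ih =>
    simp only [List.foldl_cons]
    obtain ⟨t, ht⟩ := ih (acc.add x)
    rcases pv_set_add_cases acc x with h | h
    · exact ⟨t, by rw [h]; rw [h] at ht; exact ht⟩
    · exact ⟨x :: t, by rw [h]; rw [h] at ht; simpa using ht⟩

-- ordered dedup keeps the first element first
lemma pv_ofList_cons (x : String) (xs : List String) : ∃ t, PySem.Set.ofList (x :: xs) = x :: t := by
  show ∃ t, (x :: xs).foldl PySem.Set.add PySem.Set.empty = x :: t
  simp only [List.foldl_cons]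
  obtain ⟨t, ht⟩ := pv_foldl_add_prefix xs (PySem.Set.add PySem.Set.empty x)
  have he : PySem.Set.add PySem.Set.empty x = [x] := by simp [PySem.Set.add, PySem.Set.empty]
  rw [he] at ht; exact ⟨t, ht⟩

-- ===== VERDICT (by name: the statement is the Claim_ definition above) =====
theorem select_preferred_language_entries_spec : Claim_equal_select_preferred_language_entries := by
  intro entries preferred_lang _dom
  unfold Spec_select_preferred_language_entries
  cases entries with
  | nil => rfl
  | cons e0 rest =>
    simp only [select_preferred_language_entries, select_preferred_language_entries_alt]
    have hkeys := pv_keys_group (e0 :: rest)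
    by_cases hm : preferred_lang ∈ (e0 :: rest).map pvLang
    · have hc : ((e0 :: rest).foldl (fun d e => d.modify (pvLang e) [] (fun v => v ++ [e])) PySem.Dict.empty).contains preferred_lang = true := by
        rw [PySem.Dict.contains_iff_mem_keys, hkeys, PySem.Set.mem_ofList]; exact hm
      simp only [hc, hm, if_pos, pv_getD_group]
    · have hc : ((e0 :: rest).foldl (fun d e => d.modify (pvLang e) [] (fun v => v ++ [e])) PySem.Dict.empty).contains preferred_lang = false := by
        rw [Bool.eq_false_iff, ne_eq, PySem.Dict.contains_iff_mem_keys, hkeys, PySem.Set.mem_ofList]; exact hm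
      obtain ⟨t, ht⟩ := pv_ofList_cons (pvLang e0) (rest.map pvLang)
      rw [List.map_cons] at hkeys
      simp only [hc, Bool.false_eq_true, if_false, hkeys, ht, pv_getD_group, hm]
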